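-- pv_equiv track=rewrite | github.com/ankitsumitg/advent_of_code | 2021/adventofcode-2021-16.py | literal_value
-- ===== SOURCE A (Python) =====
-- def literal_value(bin_string):
--     value = ""
--     while True:
--         value += bin_string[1:5]
--         if bin_string[0] == '0':
--             break
--         bin_string = bin_string[5:]
--     return int(value, 2), bin_string[5:]
-- ===== SOURCE B (Python) =====
-- def literal_value(bin_string):
--     # Locate the terminating group first, then accumulate the value arithmetically
--     # (no intermediate bit-string, no int() parse).
--     pos = 0
--     while bin_string[pos] != '0':
--         pos += 5
--     value = 0
--     for j in range(0, pos + 1, 5):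
--         for bit in bin_string[j + 1:j + 5]:
--             value = value * 2 + (bit == '1')
--     return value, bin_string[pos + 5:]
-- ===== Notes on version B (the rewrite author's own statement) =====
-- stated objective: alternative
-- what changed: A accumulates a bit-string inside a single test-and-slice loop and parses it with int(value,2); B first locates the terminating group with a bare index pointer, then accumulates the value arithmetically (value = value*2 + bit) over the located groups, never building a string or calling int().
-- outside the precondition, e.g. on literal_value('01 '): A returns (1, ''), B returns (2, ''); on literal_value('01_01'): A returns (5, ''), B returns (9, '')
import Mathlib
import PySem

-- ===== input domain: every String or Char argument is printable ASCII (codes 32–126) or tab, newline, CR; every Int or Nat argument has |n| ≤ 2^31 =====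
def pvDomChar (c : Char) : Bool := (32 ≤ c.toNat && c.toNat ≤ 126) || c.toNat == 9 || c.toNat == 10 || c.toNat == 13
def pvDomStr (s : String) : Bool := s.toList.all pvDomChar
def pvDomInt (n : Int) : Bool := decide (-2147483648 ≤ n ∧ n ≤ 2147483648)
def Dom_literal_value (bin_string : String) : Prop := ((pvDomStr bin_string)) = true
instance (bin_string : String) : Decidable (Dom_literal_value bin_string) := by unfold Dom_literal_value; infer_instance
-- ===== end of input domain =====

-- B replaces A's accumulate-a-bit-string-then-int() loop by locate-the-stop-group-then-
-- accumulate-arithmetically (objective: alternative decomposition, no intermediate string).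

-- ===== PORT A =====
-- int(value, 2) has no PySem primitive; ported by hand as the standard binary fold,
-- exact on strings made of '0'/'1' only — which Pre_literal_value guarantees.
def pvParseBin (cs : List Char) : Int :=
  cs.foldl (fun v c => v * 2 + (if c = '1' then 1 else 0)) 0

-- the 'while True' loop of A; 'bin_string[5:]' = drop 5 (PySem.List.slice_from_natCast)
def pvALoop (value : List Char) (s : List Char) : List Char × List Char :=
  match s with
  | [] => (value, [])          -- Python raises IndexError at bin_string[0] here (outside Pre_)
  | c :: rest =>
    let value' := value ++ PySem.List.slice (c :: rest) (some 1) (some 5)  -- bin_string[1:5]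
    if c = '0' then (value', c :: rest)
    else pvALoop value' ((c :: rest).drop 5)
termination_by s.length
decreasing_by simp

def literal_value (bin_string : String) : Int × String :=
  let r := pvALoop [] bin_string.toList
  (pvParseBin r.1, String.ofList (r.2.drop 5))   -- bin_string[5:]

-- ===== PORT B =====
-- first pass of B: 'pos = 0; while bin_string[pos] != '0': pos += 5'
def pvBFind (l : List Char) (pos : Nat) : Nat :=
  if h : pos < l.length then
    if l[pos] = '0' then pos else pvBFind l (pos + 5)
  else pos                     -- Python raises IndexError at bin_string[pos] here (outside Pre_)
termination_by l.length - pos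

def literal_value_alt (bin_string : String) : Int × String :=
  let l := bin_string.toList
  let pos := pvBFind l 0
  let value := (PySem.List.pyRange 0 ((pos : Int) + 1) 5).foldl
    (fun v j => (PySem.List.slice l (some (j + 1)) (some (j + 5))).foldl
      (fun v bit => v * 2 + (if bit = '1' then 1 else 0)) v) 0
  (value, String.ofList (l.drop (pos + 5)))      -- bin_string[pos+5:]

-- ===== PRECONDITION & SPEC =====
-- Pre_ excludes inputs whose consumed 5-bit groups contain a character other than '0'/'1':
-- there int(value, 2) either raises ValueError or accidentally accepts Python int-literal
-- syntax (underscores, whitespace) — an artefact of the int() parser nobody would specify.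
-- (group-header positions, which both programs only compare against '0', stay free).
-- It also requires a terminating group (index k, a multiple of 5, holding '0') and a
-- nonempty accumulated value, since A raises IndexError / ValueError otherwise.
def Pre_literal_value (bin_string : String) : Prop :=
  ∃ k ∈ List.range bin_string.toList.length,
    k % 5 = 0 ∧ bin_string.toList.getD k ' ' = '0' ∧
    (∀ j ∈ List.range k, j % 5 = 0 → bin_string.toList.getD j ' ' ≠ '0') ∧
    (∀ j ∈ List.range (k + 5), j % 5 ≠ 0 → bin_string.toList.getD j '0' = '0' ∨ bin_string.toList.getD j '0' = '1') ∧
    (0 < k ∨ 2 ≤ bin_string.toList.length)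
instance (bin_string : String) : Decidable (Pre_literal_value bin_string) := by
  unfold Pre_literal_value; infer_instance

def pvWitness_literal_value : String := "01"

def Spec_literal_value (bin_string : String) (out : Int × String) : Prop :=
  out = literal_value_alt bin_string
instance (bin_string : String) (out : Int × String) : Decidable (Spec_literal_value bin_string out) := by
  unfold Spec_literal_value; infer_instance

-- ===== CLAIM (what is proved, stated in full; the proofs are below) =====
def Claim_equal_literal_value : Prop := ∀ (bin_string : String), Dom_literal_value bin_string → Pre_literal_value bin_string → Spec_literal_value bin_string (literal_value bin_string)

-- ===== LEMMAS AND PROOFS =====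

-- the bits A accumulates up to and including the stop group at index k
def pvBits (l : List Char) (k : Nat) : List Char :=
  (List.range (k / 5 + 1)).flatMap (fun i => ((l.drop (5 * i)).drop 1).take 4)

theorem pvALoop_eq (k : Nat) : ∀ (l : List Char) (v : List Char),
    k < l.length → k % 5 = 0 → l.getD k ' ' = '0' →
    (∀ j < k, j % 5 = 0 → l.getD j ' ' ≠ '0') →
    pvALoop v l = (v ++ pvBits l k, l.drop k) := by
  induction k using Nat.strong_induction_on with
  | _ k ih =>
    intro l v hk h5 hstop hones
    match l with
    | [] => simp at hk
    | c :: rest =>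
      rcases Nat.eq_zero_or_pos k with h0 | hpos
      · subst h0
        have hc : c = '0' := by simpa [List.getD] using hstop
        simp only [pvALoop]
        simp only [hc]
        have hsl : PySem.List.slice ('0' :: rest) (some 1) (some 5)
            = (('0' :: rest).drop 1).take 4 := by
          have := PySem.List.slice_natCast ('0' :: rest) 1 5
          simpa using this
        simp [pvBits, hsl, List.range_succ]
      · have h5le : 5 ≤ k := by omega
        have hc : ¬ c = '0' := by
          have := hones 0 hpos (by omega)
          simpa [List.getD] using this
        simp only [pvALoop]
        rw [if_neg hc]
        have hrec := ih (k - 5) (by omega) ((c :: rest).drop 5)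
          (v ++ PySem.List.slice (c :: rest) (some 1) (some 5))
          (by have h := hk; simp only [List.length_cons] at h; simp only [List.length_drop, List.length_cons]; omega) (by omega)
          (by
            rw [List.getD_eq_getElem?_getD, List.getElem?_drop,
              ← List.getD_eq_getElem?_getD]
            have : 5 + (k - 5) = k := by omega
            rw [this]; exact hstop)
          (by
            intro j hj hj5
            rw [List.getD_eq_getElem?_getD, List.getElem?_drop,
              ← List.getD_eq_getElem?_getD]
            exact hones (5 + j) (by omega) (by omega))
        rw [hrec, Prod.mk.injEq]
        constructor
        · -- value components agree
          rw [List.append_assoc]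
          congr 1
          -- pvBits (c :: rest) k = slice[1:5] ++ pvBits (drop 5) (k-5)
          have hn : k / 5 + 1 = (k - 5) / 5 + 1 + 1 := by omega
          have hsl : PySem.List.slice (c :: rest) (some 1) (some 5)
              = ((c :: rest).drop 1).take 4 := by
            have := PySem.List.slice_natCast (c :: rest) 1 5
            simpa using this
          symm
          rw [pvBits, hn, List.range_succ_eq_map]
          rw [List.flatMap_cons, List.flatMap_map]
          congr 1
          · simpa using hsl.symm
          · rw [pvBits]
            apply List.flatMap_congr
            intro i hi
            simp only [List.drop_drop]
            congr 2
            omega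
        · rw [List.drop_drop]
          congr 1
          omega

theorem pvBFind_eq (l : List Char) (k : Nat)
    (hk : k < l.length) (h5 : k % 5 = 0) (hstop : l.getD k ' ' = '0')
    (hones : ∀ j < k, j % 5 = 0 → l.getD j ' ' ≠ '0') :
    ∀ p, p ≤ k → p % 5 = 0 → pvBFind l p = k := by
  intro p
  induction hp : k - p using Nat.strong_induction_on generalizing p with
  | _ n ih =>
    intro hpk hp5
    rcases Nat.eq_or_lt_of_le hpk with heq | hlt
    · subst heq
      have hstop' : l[p] = '0' := by
        rw [List.getD_eq_getElem?_getD, List.getElem?_eq_getElem hk] at hstop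
        simpa using hstop
      rw [pvBFind, dif_pos hk, if_pos hstop']
    · have hplen : p < l.length := by omega
      rw [pvBFind, dif_pos hplen]
      have h1 : ¬ l[p] = '0' := by
        have := hones p hlt hp5
        rw [List.getD_eq_getElem?_getD, List.getElem?_eq_getElem hplen] at this
        simpa using this
      rw [if_neg h1]
      have hstep : p + 5 ≤ k := by omega
      exact ih (k - (p + 5)) (by omega) (p + 5) rfl hstep (by omega)

theorem pvFoldl_flatMap {α β : Type} (f : β → Char → β) (g : α → List Char) :
    ∀ (l : List α) (init : β),
      (l.flatMap g).foldl f init = l.foldl (fun acc x => (g x).foldl f acc) init := by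
  intro l
  induction l with
  | nil => intro init; simp
  | cons x xs ih => intro init; simp [List.foldl_append, ih]

theorem pvBVal_eq (l : List Char) (k : Nat) (h5 : k % 5 = 0) :
    (PySem.List.pyRange 0 ((k : Int) + 1) 5).foldl
      (fun v j => (PySem.List.slice l (some (j + 1)) (some (j + 5))).foldl
        (fun v bit => v * 2 + (if bit = '1' then 1 else 0)) v) 0
    = pvParseBin (pvBits l k) := by
  have hrange : PySem.List.pyRange 0 ((k : Int) + 1) 5
      = (List.range (k / 5 + 1)).map (fun i => ((5 * i : Nat) : Int)) := by
    rw [PySem.List.pyRange_of_pos 0 ((k : Int) + 1) (by norm_num)]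
    rw [if_pos (by positivity)]
    have : (((k : Int) + 1 - 0 + 5 - 1) / 5).toNat = k / 5 + 1 := by omega
    rw [this]
    apply List.map_congr_left
    intro i _
    push_cast
    ring
  rw [hrange, List.foldl_map, pvParseBin, pvBits, pvFoldl_flatMap]
  apply PySem.List.foldl_congr_mem
  intro acc i _
  have hsl : PySem.List.slice l (some (((5 * i : Nat) : Int) + 1)) (some (((5 * i : Nat) : Int) + 5))
      = (l.drop (5 * i + 1)).take 4 := by
    have h1 : (((5 * i : Nat) : Int) + 1) = ((5 * i + 1 : Nat) : Int) := by push_cast; ring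
    have h2 : (((5 * i : Nat) : Int) + 5) = ((5 * i + 5 : Nat) : Int) := by push_cast; ring
    rw [h1, h2, PySem.List.slice_natCast]
    congr 1
    omega
  rw [hsl, List.drop_drop]

-- ===== VERDICT (by name: the statement is the Claim_ definition above) =====
theorem literal_value_spec : Claim_equal_literal_value := by
  intro s _ hpre
  obtain ⟨k, hkmem, h5, hstop, hones, _, _⟩ := hpre
  rw [List.mem_range] at hkmem
  have hones' : ∀ j < k, j % 5 = 0 → s.toList.getD j ' ' ≠ '0' := by
    intro j hj hj5
    exact hones j (List.mem_range.mpr hj) hj5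
  unfold Spec_literal_value literal_value literal_value_alt
  simp only
  rw [pvALoop_eq k s.toList [] hkmem h5 hstop hones']
  rw [pvBFind_eq s.toList k hkmem h5 hstop hones' 0 (Nat.zero_le k) rfl]
  rw [pvBVal_eq s.toList k h5]
  simp
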